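-- pv_equiv track=rewrite | github.com/jozsef-kiss/Klima-Weboldal | footer_fixer.py | javit_utvonal
-- ===== SOURCE A (Python) =====
-- cel_mappak = ['js', 'css', 'images', 'fonts']
--
-- def javit_utvonal(fajl_melyseg, eredeti_utvonal):
--     # 1. Abszolút linkeket békén hagyjuk
--     if eredeti_utvonal.startswith(('http', '//', 'tel:', 'mailto:', '#')):
--         return eredeti_utvonal
--
--     tiszta_utvonal = eredeti_utvonal
--     # Leszedjük a meglévő ../ és ./ és / részeket az elejéről
--     while tiszta_utvonal.startswith('../') or tiszta_utvonal.startswith('./') or tiszta_utvonal.startswith('/'):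
--         if tiszta_utvonal.startswith('../'): tiszta_utvonal = tiszta_utvonal[3:]
--         elif tiszta_utvonal.startswith('./'): tiszta_utvonal = tiszta_utvonal[2:]
--         elif tiszta_utvonal.startswith('/'): tiszta_utvonal = tiszta_utvonal[1:]
--
--     # 2. Ha ez egy technikai fájl (js, css) VAGY HTML fájl (amit linkelünk a footerben)
--     is_resource = any(tiszta_utvonal.startswith(mappa + '/') for mappa in cel_mappak)
--     is_html_link = tiszta_utvonal.endswith('.html')
--
--     if is_resource or is_html_link:
--         # Generáljuk az új prefixet a mélység alapján
--         # Ha a fájl a gyökérben van (index.html), a mélység 0 -> prefix ""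
--         # Ha a fájl mélyen van, a prefix pl. "../../"
--         uj_prefix = "../" * fajl_melyseg
--         return uj_prefix + tiszta_utvonal
--
--     return eredeti_utvonal
-- ===== SOURCE B (Python) =====
-- cel_mappak = ['js', 'css', 'images', 'fonts']
--
-- def javit_utvonal(fajl_melyseg, eredeti_utvonal):
--     # Absolute / special links are left untouched
--     if eredeti_utvonal.startswith(('http', '//', 'tel:', 'mailto:', '#')):
--         return eredeti_utvonal
--
--     # Single character-level scan: the loop of A repeatedly peels the tokens
--     # '../', './', '/'; that leading prefix is exactly a sequence of segments
--     # '', '.' or '..' each terminated by '/'.  We scan once, remembering the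
--     # suffix after the last terminating '/'.
--     keep = eredeti_utvonal
--     cur = eredeti_utvonal
--     dots = 0
--     while cur:
--         ch = cur[0]
--         if ch == '/':
--             cur = cur[1:]
--             keep = cur
--             dots = 0
--         elif ch == '.' and dots < 2:
--             cur = cur[1:]
--             dots += 1
--         else:
--             break
--
--     # resource iff the first '/'-segment is one of the target folders
--     head, sep, _ = keep.partition('/')
--     if (sep == '/' and head in cel_mappak) or keep.endswith('.html'):
--         return '../' * fajl_melyseg + keep
--     return eredeti_utvonal
-- ===== Notes on version B (the rewrite author's own statement) =====
-- stated objective: alternative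
-- what changed: The while-loop that repeatedly peels the tokens '../', './', '/' with startswith and slicing is replaced by a single character-level scan (tracking the suffix after the last token-terminating '/'), and the any(startswith(folder+'/')) resource test is replaced by partitioning on the first '/' and looking the head segment up in cel_mappak.
import Mathlib
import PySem

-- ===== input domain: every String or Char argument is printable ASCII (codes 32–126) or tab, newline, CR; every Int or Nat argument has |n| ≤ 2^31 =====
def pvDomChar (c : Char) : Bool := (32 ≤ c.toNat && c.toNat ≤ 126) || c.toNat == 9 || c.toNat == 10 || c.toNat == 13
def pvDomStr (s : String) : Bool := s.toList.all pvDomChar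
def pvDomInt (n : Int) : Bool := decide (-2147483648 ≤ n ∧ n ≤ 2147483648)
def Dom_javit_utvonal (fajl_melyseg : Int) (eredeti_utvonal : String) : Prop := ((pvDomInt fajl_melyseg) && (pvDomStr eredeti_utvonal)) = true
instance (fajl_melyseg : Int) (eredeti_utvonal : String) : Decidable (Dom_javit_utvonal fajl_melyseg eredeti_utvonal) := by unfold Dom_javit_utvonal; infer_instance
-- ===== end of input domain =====

-- B replaces A's token-peeling while-loop with a single character-level scan and A's
-- any(startswith) resource test with a partition-on-'/' head lookup (objective: alternative, same cost).

-- ===== PORT A =====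
-- cel_mappak (module constant), shared by both ports (it is the same literal list in Source A and Source B)
def pvCelMappak : List (List Char) := [['j','s'], ['c','s','s'], ['i','m','a','g','e','s'], ['f','o','n','t','s']]

-- the startswith(('http','//','tel:','mailto:','#')) guard — identical line in A and B
def pvAbs (l : List Char) : Bool :=
  PySem.Chars.startswith l ['h','t','t','p'] || PySem.Chars.startswith l ['/','/'] ||
  PySem.Chars.startswith l ['t','e','l',':'] || PySem.Chars.startswith l ['m','a','i','l','t','o',':'] ||
  PySem.Chars.startswith l ['#']

-- A's while-loop: the if/elif chain ('../' first, then './', then '/') as a pattern match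
def pvStripA : List Char → List Char
  | '.' :: '.' :: '/' :: rest => pvStripA rest
  | '.' :: '/' :: rest => pvStripA rest
  | '/' :: rest => pvStripA rest
  | l => l

-- '../' * fajl_melyseg (Python's str * int: empty for n ≤ 0); hand-ported, exact
def pvPrefix (n : Int) : List Char := List.flatten (List.replicate n.toNat ['.', '.', '/'])

def javit_utvonal (fajl_melyseg : Int) (eredeti_utvonal : String) : String :=
  let l := eredeti_utvonal.toList
  if pvAbs l then eredeti_utvonal
  else
    let tiszta := pvStripA l
    let isResource := pvCelMappak.any (fun m => PySem.Chars.startswith tiszta (m ++ ['/']))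
    let isHtml := PySem.Chars.endswith tiszta ['.', 'h', 't', 'm', 'l']
    if isResource || isHtml then String.ofList (pvPrefix fajl_melyseg ++ tiszta)
    else eredeti_utvonal

-- ===== PORT B =====
-- B's while-loop: keep = suffix after the last good '/', cur = rest of the scan, dots = run of '.'
def pvScanB (keep cur : List Char) (dots : Nat) : List Char :=
  match cur with
  | [] => keep
  | c :: rest =>
    if c = '/' then pvScanB rest rest 0
    else if c = '.' ∧ dots < 2 then pvScanB keep rest (dots + 1)
    else keep

-- keep.partition('/'): head before the first '/', sep = whether a '/' occurs; hand-ported, exact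
def javit_utvonal_alt (fajl_melyseg : Int) (eredeti_utvonal : String) : String :=
  let l := eredeti_utvonal.toList
  if pvAbs l then eredeti_utvonal
  else
    let keep := pvScanB l l 0
    let head := keep.takeWhile (fun c => c ≠ '/')
    let sep : Bool := decide ('/' ∈ keep)
    if (sep && decide (head ∈ pvCelMappak)) || PySem.Chars.endswith keep ['.', 'h', 't', 'm', 'l'] then
      String.ofList (pvPrefix fajl_melyseg ++ keep)
    else eredeti_utvonal

-- ===== PRECONDITION & SPEC =====
def Spec_javit_utvonal (fajl_melyseg : Int) (eredeti_utvonal : String) (out : String) : Prop := out = javit_utvonal_alt fajl_melyseg eredeti_utvonal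
instance (fajl_melyseg : Int) (eredeti_utvonal : String) (out : String) : Decidable (Spec_javit_utvonal fajl_melyseg eredeti_utvonal out) := by unfold Spec_javit_utvonal; infer_instance

-- ===== CLAIM (what is proved, stated in full; the proofs are below) =====
def Claim_equal_javit_utvonal : Prop := ∀ (fajl_melyseg : Int) (eredeti_utvonal : String), Dom_javit_utvonal fajl_melyseg eredeti_utvonal → Spec_javit_utvonal fajl_melyseg eredeti_utvonal (javit_utvonal fajl_melyseg eredeti_utvonal)

-- ===== LEMMAS AND PROOFS =====

-- when no token '../', './', '/' starts l, the scan confirms no new '/': it returns keep = l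
theorem pvScanB_stuck (l : List Char)
    (h1 : ∀ r, l ≠ '.' :: '.' :: '/' :: r) (h2 : ∀ r, l ≠ '.' :: '/' :: r)
    (h3 : ∀ r, l ≠ '/' :: r) : pvScanB l l 0 = l := by
  match l with
  | [] => simp [pvScanB]
  | c :: rest =>
    have hc : c ≠ '/' := by intro h; exact h3 rest (by rw [h])
    match rest, c with
    | [], c => simp [pvScanB, hc]
    | c2 :: r2, c =>
      by_cases hcd : c = '.'
      · subst hcd
        have hc2 : c2 ≠ '/' := by intro h; exact h2 r2 (by rw [h])
        match r2, c2 with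
        | [], c2 => by_cases h : c2 = '.' <;> simp [pvScanB, hc, hc2, h]
        | c3 :: r3, c2 =>
          by_cases hc2d : c2 = '.'
          · subst hc2d
            have hc3 : c3 ≠ '/' := by intro h; exact h1 r3 (by rw [h])
            simp [pvScanB, hc, hc3]
          · simp [pvScanB, hc, hc2, hc2d]
      · simp [pvScanB, hc, hcd]

-- B's one-pass scan computes exactly A's greedy token stripping
theorem pvScanB_eq_pvStripA (l : List Char) : pvScanB l l 0 = pvStripA l := by
  fun_induction pvStripA l with
  | case1 rest ih => simpa [pvScanB] using ih
  | case2 rest ih => simpa [pvScanB] using ih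
  | case3 rest ih => simpa [pvScanB] using ih
  | case4 l h1 h2 h3 => exact pvScanB_stuck l h1 h2 h3

-- (w ++ ['/']) is a prefix of t iff t's first '/'-segment is exactly w (for w without '/')
theorem prefix_slash_iff (w t : List Char) (hw : '/' ∉ w) :
    (w ++ ['/']) <+: t ↔ '/' ∈ t ∧ t.takeWhile (fun c => c ≠ '/') = w := by
  induction w generalizing t with
  | nil =>
    cases t with
    | nil => simp
    | cons c r =>
      by_cases hc : c = '/'
      · subst hc; simp
      · simp [List.cons_prefix_cons, hc, Ne.symm hc]
  | cons a w ih =>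
    have ha : a ≠ '/' := fun h => hw (h ▸ List.mem_cons_self)
    have hw' : '/' ∉ w := fun h => hw (List.mem_cons_of_mem _ h)
    cases t with
    | nil => simp
    | cons c r =>
      by_cases hc : c = a
      · subst hc
        simp [List.cons_prefix_cons, ha, ih r hw', List.mem_cons]
        tauto
      · by_cases hcs : c = '/'
        · subst hcs; simp [List.cons_prefix_cons, Ne.symm hc]
        · simp [List.cons_prefix_cons, hc, Ne.symm hc, hcs]

-- A's any(startswith) over the four folders = B's partition head test
theorem resource_eq (t : List Char) :
    pvCelMappak.any (fun m => PySem.Chars.startswith t (m ++ ['/']))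
      = ((decide ('/' ∈ t)) && decide (t.takeWhile (fun c => c ≠ '/') ∈ pvCelMappak)) := by
  have h : ∀ w : List Char, '/' ∉ w → PySem.Chars.startswith t (w ++ ['/'])
      = ((decide ('/' ∈ t)) && decide (t.takeWhile (fun c => c ≠ '/') = w)) := by
    intro w hw
    rw [Bool.eq_iff_iff]
    simp [PySem.Chars.startswith_iff, prefix_slash_iff w t hw]
  simp only [pvCelMappak, List.any_cons, List.any_nil,
    h ['j','s'] (by decide), h ['c','s','s'] (by decide),
    h ['i','m','a','g','e','s'] (by decide), h ['f','o','n','t','s'] (by decide)]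
  rw [Bool.eq_iff_iff]
  simp [List.mem_cons]
  tauto

-- ===== VERDICT (by name: the statement is the Claim_ definition above) =====
theorem javit_utvonal_spec : Claim_equal_javit_utvonal := by
  intro d s _
  unfold Spec_javit_utvonal javit_utvonal javit_utvonal_alt
  simp only [pvScanB_eq_pvStripA, resource_eq]
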